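-- pv_equiv track=rewrite | github.com/AngelButterfally/PDF | searchKeyWords.py | getFailureInformation
-- ===== SOURCE A (Python) =====
-- def getFailureInformation(codeList, number, location, targetCode,allLine):
--     '''提取指定故障码的相关信息（提取单个故障码）,输入故障码词典、故障码数量、故障码所在行位置词典、要检索的故障码、输出被检索的故障码和相关信息'''
--     missionComplete = False     #故障码查询结果标志位
--     targetNumber = {}
--     targetCount = 0
--     if len(targetCode) != 6:
--         missionComplete = False
--     else:
--         for m in range(number):
--             if targetCode in codeList[m]:
--                 targetNumber[targetCount] = m
--                 missionComplete = True
--                 targetCount = targetCount + 1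
--
--     if missionComplete == True:
--         dataTargetDic = {}
--         for i in range(targetCount):
--             targetLocationUp = location[targetNumber[i]]
--             targetLocationDown = location[targetNumber[i] + 1]
--             targetRange = targetLocationDown - targetLocationUp
--
--             dataTargetDic[i] = ''
--             for n in range(targetRange):
--                 lineNumber = targetLocationUp + n
--                 dataTargetDic[i] = dataTargetDic[i] + allLine[lineNumber]
--
--         dataTarget = ''
--         for j in range(targetCount):
--             dataTarget = dataTarget + dataTargetDic[j]
--             if j != targetCount - 1:
--                 dataTarget = dataTarget + '\n'
--         return dataTarget
--     else:
--         missionFailed = '您输入的故障码有误，请核验后再次输入！\n'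
--         return missionFailed
-- ===== SOURCE B (Python) =====
-- FAIL = '您输入的故障码有误，请核验后再次输入！\n'
--
-- def getFailureInformation(codeList, number, location, targetCode, allLine):
--     if len(targetCode) != 6:
--         return FAIL
--     result = None   # built back-to-front; None = no match seen yet
--     for m in reversed(range(number)):
--         if targetCode in codeList[m]:
--             block = ''.join(allLine[k] for k in range(location[m], location[m + 1]))
--             result = block if result is None else block + '\n' + result
--     return FAIL if result is None else result
-- ===== Notes on version B (the rewrite author's own statement) =====
-- stated objective: simpler
-- what changed: A's three forward passes (match-index dict + counter, dict-replay block building by repeated concatenation, and a separator loop) become one pass in reverse that builds the output back-to-front with an Optional accumulator deciding the '\n' separators; the targetNumber/dataTargetDic dicts, the counter and both replay loops disappear.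
import Mathlib
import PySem

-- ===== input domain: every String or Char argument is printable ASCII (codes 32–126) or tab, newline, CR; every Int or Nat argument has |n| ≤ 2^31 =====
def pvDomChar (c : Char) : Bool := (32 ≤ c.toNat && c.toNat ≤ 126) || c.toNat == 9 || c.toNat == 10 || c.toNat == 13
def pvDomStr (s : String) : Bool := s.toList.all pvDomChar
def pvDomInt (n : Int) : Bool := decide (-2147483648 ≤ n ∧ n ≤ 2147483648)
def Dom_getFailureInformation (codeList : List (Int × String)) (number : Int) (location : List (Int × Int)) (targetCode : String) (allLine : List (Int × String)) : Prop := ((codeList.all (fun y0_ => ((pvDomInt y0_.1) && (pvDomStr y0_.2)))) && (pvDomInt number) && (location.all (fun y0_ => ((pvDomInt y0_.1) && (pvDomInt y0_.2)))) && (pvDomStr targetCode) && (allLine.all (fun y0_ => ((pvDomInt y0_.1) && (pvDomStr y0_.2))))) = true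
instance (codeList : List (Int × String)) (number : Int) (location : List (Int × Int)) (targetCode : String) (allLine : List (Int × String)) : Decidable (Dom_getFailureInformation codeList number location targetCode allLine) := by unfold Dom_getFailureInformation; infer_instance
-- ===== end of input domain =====

-- B replaces A's three forward passes (match-index dict + counter, dict-replay block building,
-- separator loop) by ONE pass in reverse that builds the output back-to-front with an Optional
-- accumulator deciding the '\n' separators; objective: simpler.

-- ===== PORT A =====
def getFailureInformation (codeList : List (Int × String)) (number : Int) (location : List (Int × Int)) (targetCode : String) (allLine : List (Int × String)) : String :=
  let cd := PySem.Dict.mk codeList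
  let ld := PySem.Dict.mk location
  let al := PySem.Dict.mk allLine
  -- missionComplete / targetNumber / targetCount, folded over range(number)
  let st : Bool × PySem.Dict Int Int × Int :=
    if PySem.Str.len targetCode ≠ 6 then (false, PySem.Dict.mk [], 0)
    else
      (PySem.List.pyRange 0 number 1).foldl
        (fun st m =>
          if PySem.Str.isIn targetCode (cd.getD m "") then
            (true, st.2.1.insert st.2.2 m, st.2.2 + 1)
          else st)
        (false, PySem.Dict.mk [], 0)
  if st.1 then
    -- dataTargetDic: strings carried as List Char (Lean's String.append is kernel-opaque)
    let dic : PySem.Dict Int (List Char) :=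
      (PySem.List.pyRange 0 st.2.2 1).foldl
        (fun d i =>
          let up := ld.getD (st.2.1.getD i 0) 0
          let down := ld.getD (st.2.1.getD i 0 + 1) 0
          (PySem.List.pyRange 0 (down - up) 1).foldl
            (fun d n => d.insert i (d.getD i [] ++ (al.getD (up + n) "").toList))
            (d.insert i []))
        (PySem.Dict.mk [])
    let out : List Char :=
      (PySem.List.pyRange 0 st.2.2 1).foldl
        (fun acc j =>
          let acc := acc ++ dic.getD j []
          if j ≠ st.2.2 - 1 then acc ++ ['\n'] else acc)
        []
    String.ofList out
  else "您输入的故障码有误，请核验后再次输入！\n"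

-- ===== PORT B =====
def pvFail : String := "您输入的故障码有误，请核验后再次输入！\n"

def getFailureInformation_alt (codeList : List (Int × String)) (number : Int) (location : List (Int × Int)) (targetCode : String) (allLine : List (Int × String)) : String :=
  if PySem.Str.len targetCode ≠ 6 then pvFail
  else
    -- result built back-to-front over reversed(range(number)); none = no match seen yet
    let result : Option (List Char) :=
      ((PySem.List.pyRange 0 number 1).reverse).foldl
        (fun result m =>
          if PySem.Str.isIn targetCode ((PySem.Dict.mk codeList).getD m "") then
            let block := PySem.Chars.join []
              ((PySem.List.pyRange ((PySem.Dict.mk location).getD m 0)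
                  ((PySem.Dict.mk location).getD (m + 1) 0) 1).map
                (fun k => ((PySem.Dict.mk allLine).getD k "").toList))
            some (match result with | none => block | some r => block ++ '\n' :: r)
          else result)
        none
    match result with
    | none => pvFail
    | some r => String.ofList r

-- ===== PRECONDITION & SPEC =====
-- Pre_ excludes exactly the inputs on which Python A raises a KeyError: a missing codeList key in
-- range(number), or (for a matched index m) a missing location key m / m+1 or a missing allLine key
-- in the matched block's line range.
def Pre_getFailureInformation (codeList : List (Int × String)) (number : Int) (location : List (Int × Int)) (targetCode : String) (allLine : List (Int × String)) : Prop :=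
  PySem.Str.len targetCode = 6 →
    ∀ m ∈ PySem.List.pyRange 0 number 1,
      ((PySem.Dict.mk codeList).get? m).isSome = true ∧
      (PySem.Str.isIn targetCode ((PySem.Dict.mk codeList).getD m "") = true →
        ((PySem.Dict.mk location).get? m).isSome = true ∧
        ((PySem.Dict.mk location).get? (m + 1)).isSome = true ∧
        ∀ k ∈ PySem.List.pyRange ((PySem.Dict.mk location).getD m 0)
            ((PySem.Dict.mk location).getD (m + 1) 0) 1,
          ((PySem.Dict.mk allLine).get? k).isSome = true)
instance (codeList : List (Int × String)) (number : Int) (location : List (Int × Int)) (targetCode : String) (allLine : List (Int × String)) : Decidable (Pre_getFailureInformation codeList number location targetCode allLine) := by unfold Pre_getFailureInformation; infer_instance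

def pvWitness_getFailureInformation : (List (Int × String)) × Int × (List (Int × Int)) × String × (List (Int × String)) :=
  ([(0, "AB1234 oops")], 1, [(0, 0), (1, 1)], "AB1234", [(0, "line0")])

def Spec_getFailureInformation (codeList : List (Int × String)) (number : Int) (location : List (Int × Int)) (targetCode : String) (allLine : List (Int × String)) (out : String) : Prop := out = getFailureInformation_alt codeList number location targetCode allLine
instance (codeList : List (Int × String)) (number : Int) (location : List (Int × Int)) (targetCode : String) (allLine : List (Int × String)) (out : String) : Decidable (Spec_getFailureInformation codeList number location targetCode allLine out) := by unfold Spec_getFailureInformation; infer_instance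

-- ===== CLAIM (what is proved, stated in full; the proofs are below) =====
def Claim_equal_getFailureInformation : Prop := ∀ (codeList : List (Int × String)) (number : Int) (location : List (Int × Int)) (targetCode : String) (allLine : List (Int × String)), Dom_getFailureInformation codeList number location targetCode allLine → Pre_getFailureInformation codeList number location targetCode allLine → Spec_getFailureInformation codeList number location targetCode allLine (getFailureInformation codeList number location targetCode allLine)

-- ===== LEMMAS AND PROOFS =====

theorem pv_foldl_const_true {α : Type} (l : List α) (b : Bool) :
    l.foldl (fun _ _ => true) b = (b || !l.isEmpty) := by
  induction l generalizing b with
  | nil => simp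
  | cons x t ih => simp [ih]

theorem pv_insLoop_snd (M : List Int) (d : PySem.Dict Int Int) (c : Int) :
    (M.foldl (fun s m => (s.1.insert s.2 m, s.2 + 1)) (d, c)).2 = c + M.length := by
  induction M generalizing d c with
  | nil => simp
  | cons m t ih => simp [ih]; ring

theorem pv_insLoop_getD (M : List Int) (d : PySem.Dict Int Int) (c j : Int) :
    ((M.foldl (fun s m => (s.1.insert s.2 m, s.2 + 1)) (d, c)).1).getD j 0 =
      if c ≤ j ∧ j < c + M.length then M.getD (j - c).toNat 0 else d.getD j 0 := by
  induction M generalizing d c with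
  | nil => simp
  | cons m t ih =>
    simp only [List.foldl_cons, List.length_cons]
    rw [ih]
    rcases lt_trichotomy j c with h | h | h
    · rw [if_neg (by omega), if_neg (by omega), PySem.Dict.getD_insert, if_neg (by omega)]
    · subst h
      rw [if_neg (by omega), if_pos (by omega), PySem.Dict.getD_insert_self]
      simp
    · by_cases hlt : j < c + 1 + t.length
      · rw [if_pos (by omega), if_pos (by omega)]
        have h1 : (j - c).toNat = (j - (c + 1)).toNat + 1 := by omega
        simp [h1]
      · rw [if_neg (by omega), if_neg (by omega), PySem.Dict.getD_insert, if_neg (by omega)]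

theorem pv_innerLoop (l : List Int) (f : Int → List Char) (d : PySem.Dict Int (List Char))
    (i : Int) (a : List Char) :
    l.foldl (fun d n => d.insert i (d.getD i [] ++ f n)) (d.insert i a) =
      d.insert i (a ++ l.flatMap f) := by
  induction l generalizing a with
  | nil => simp
  | cons n t ih =>
    simp only [List.foldl_cons, PySem.Dict.getD_insert_self, PySem.Dict.insert_insert_self]
    rw [ih]
    simp

theorem pv_getD_foldl_insert_of_not_mem (v : Int → List Char) (I : List Int)
    (d : PySem.Dict Int (List Char)) (j : Int) (h : j ∉ I) (x : List Char) :
    (I.foldl (fun d i => d.insert i (v i)) d).getD j x = d.getD j x := by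
  induction I generalizing d with
  | nil => rfl
  | cons i t ih =>
    simp only [List.mem_cons, not_or] at h
    simp only [List.foldl_cons]
    rw [ih _ h.2, PySem.Dict.getD_insert, if_neg h.1]

theorem pv_getD_foldl_insert_nodup (v : Int → List Char) (I : List Int)
    (d : PySem.Dict Int (List Char)) (hI : I.Nodup) (j : Int) (hj : j ∈ I) :
    (I.foldl (fun d i => d.insert i (v i)) d).getD j [] = v j := by
  induction I generalizing d with
  | nil => cases hj
  | cons i t ih =>
    simp only [List.foldl_cons]
    rcases List.mem_cons.mp hj with h | h
    · subst h
      rw [pv_getD_foldl_insert_of_not_mem _ _ _ _ (List.nodup_cons.mp hI).1,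
        PySem.Dict.getD_insert_self]
    · exact ih _ (List.nodup_cons.mp hI).2 h

theorem pv_join_nil_eq_flatten (l : List (List Char)) :
    PySem.Chars.join [] l = l.flatten := by
  induction l with
  | nil => simp [PySem.Chars.join_nil]
  | cons p t ih =>
    cases t with
    | nil => simp [PySem.Chars.join_singleton]
    | cons q r =>
      rw [PySem.Chars.join_cons_cons, ih]
      simp

theorem pv_pyRange_shift (a b : Int) :
    PySem.List.pyRange a b 1 = (PySem.List.pyRange 0 (b - a) 1).map (fun k => a + k) := by
  rw [PySem.List.pyRange_one, PySem.List.pyRange_one]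
  simp [List.map_map, Function.comp_def]

theorem pv_loop3 (g : Int → List Char) (a b : Int) (h : a < b) (acc0 : List Char) :
    (PySem.List.pyRange a b 1).foldl
        (fun acc j => if j ≠ b - 1 then (acc ++ g j) ++ ['\n'] else acc ++ g j) acc0 =
      acc0 ++ PySem.Chars.join ['\n'] ((PySem.List.pyRange a b 1).map g) := by
  induction hk : (b - a).toNat generalizing a acc0 with
  | zero => omega
  | succ n ih =>
    rw [PySem.List.pyRange_one_cons h]
    by_cases hab : a + 1 < b
    · have hne : a ≠ b - 1 := by omega
      simp only [List.foldl_cons, List.map_cons, if_pos hne]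
      rw [ih (a + 1) hab _ (by omega)]
      rw [PySem.List.pyRange_one_cons hab]
      rw [List.map_cons, PySem.Chars.join_cons_cons, ← List.map_cons, ← PySem.List.pyRange_one_cons hab]
      simp
    · have heq : a = b - 1 := by omega
      have hnil : PySem.List.pyRange (a + 1) b 1 = [] := PySem.List.pyRange_one_eq_nil (by omega)
      simp only [List.foldl_cons, hnil, List.foldl_nil, List.map_cons, List.map_nil,
        PySem.Chars.join_singleton, if_neg (by omega : ¬ a ≠ b - 1)]

theorem pv_map_getD_range (M : List Int) :
    (List.range M.length).map (fun k => M.getD k 0) = M := by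
  apply List.ext_getElem
  · simp
  · intro i h1 h2
    simp [List.getD_eq_getElem?_getD, List.getElem?_eq_getElem (by simpa using h1)]

theorem pv_block_eq (location : List (Int × Int)) (allLine : List (Int × String)) (m : Int) :
    (PySem.List.pyRange 0 ((PySem.Dict.mk location).getD (m + 1) 0 - (PySem.Dict.mk location).getD m 0) 1).flatMap
        (fun n => ((PySem.Dict.mk allLine).getD ((PySem.Dict.mk location).getD m 0 + n) "").toList)
      = PySem.Chars.join []
          ((PySem.List.pyRange ((PySem.Dict.mk location).getD m 0) ((PySem.Dict.mk location).getD (m + 1) 0) 1).map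
            (fun k => ((PySem.Dict.mk allLine).getD k "").toList)) := by
  rw [pv_join_nil_eq_flatten, ← List.flatMap_def,
    pv_pyRange_shift ((PySem.Dict.mk location).getD m 0) ((PySem.Dict.mk location).getD (m + 1) 0),
    List.flatMap_map]

-- the back-to-front fold of B computes the '\n'-join of the matched blocks (or none)
theorem pv_rev_fold (p : Int → Bool) (g : Int → List Char) (L : List Int) :
    (L.reverse).foldl
        (fun acc m =>
          if p m then some (match acc with | none => g m | some r => g m ++ '\n' :: r) else acc)
        none =
      if (L.filter p).isEmpty then none
      else some (PySem.Chars.join ['\n'] ((L.filter p).map g)) := by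
  rw [List.foldl_reverse]
  induction L with
  | nil => simp
  | cons m t ih =>
    simp only [List.foldr_cons, List.filter_cons]
    by_cases hp : p m = true
    · rw [if_pos hp, if_pos hp, ih]
      by_cases ht : (t.filter p).isEmpty = true
      · rw [if_pos ht]
        have h0 : t.filter p = [] := List.isEmpty_iff.mp ht
        simp [h0, PySem.Chars.join_singleton]
      · rw [if_neg ht]
        have h0 : t.filter p ≠ [] := fun h => ht (by simp [h])
        obtain ⟨q, r, hqr⟩ := List.exists_cons_of_ne_nil h0
        rw [hqr]
        simp only [List.isEmpty_cons, Bool.false_eq_true, if_false, List.map_cons]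
        rw [PySem.Chars.join_cons_cons]
        simp
    · rw [if_neg hp, if_neg hp, ih]
  
-- ===== VERDICT (by name: the statement is the Claim_ definition above) =====
theorem getFailureInformation_spec : Claim_equal_getFailureInformation := by
  intro codeList number location targetCode allLine _ _
  unfold Spec_getFailureInformation getFailureInformation getFailureInformation_alt
  by_cases hlen : PySem.Str.len targetCode = 6
  · have hA : ¬ (PySem.Str.len targetCode ≠ 6) := not_not_intro hlen
    simp only [if_neg hA]
    set st : Bool × PySem.Dict Int Int × Int :=
      (PySem.List.pyRange 0 number 1).foldl
        (fun st m =>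
          if PySem.Str.isIn targetCode ((PySem.Dict.mk codeList).getD m "") then
            (true, st.2.1.insert st.2.2 m, st.2.2 + 1)
          else st)
        (false, PySem.Dict.mk [], 0) with hst
    set M : List Int := (PySem.List.pyRange 0 number 1).filter
        (fun m => PySem.Str.isIn targetCode ((PySem.Dict.mk codeList).getD m "")) with hMdef
    have hstv : st = (!M.isEmpty,
        M.foldl (fun s m => (s.1.insert s.2 m, s.2 + 1)) (PySem.Dict.mk [], 0)) := by
      rw [hst, PySem.List.foldl_if_eq_foldl_filter
        (p := fun m => PySem.Str.isIn targetCode ((PySem.Dict.mk codeList).getD m ""))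
        (f := fun (st : Bool × PySem.Dict Int Int × Int) m => (true, st.2.1.insert st.2.2 m, st.2.2 + 1)),
        PySem.List.foldl_prod_mk (f := fun (_ : Bool) (_ : Int) => true)
        (g := fun (s : PySem.Dict Int Int × Int) (m : Int) => (s.1.insert s.2 m, s.2 + 1)),
        pv_foldl_const_true, ← hMdef]
      simp
    have h1 : st.1 = !M.isEmpty := by rw [hstv]
    have h22 : st.2.2 = (M.length : Int) := by rw [hstv]; simp [pv_insLoop_snd]
    have hnum : ∀ i : Int, 0 ≤ i → i < (M.length : Int) → st.2.1.getD i 0 = M.getD i.toNat 0 := by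
      intro i h0 hi
      rw [hstv]
      show (M.foldl (fun s m => (s.1.insert s.2 m, s.2 + 1)) (PySem.Dict.mk [], 0)).1.getD i 0 = _
      rw [pv_insLoop_getD, if_pos (by omega)]
      simp
    rw [h1, h22]
    rw [pv_rev_fold (fun m => PySem.Str.isIn targetCode ((PySem.Dict.mk codeList).getD m ""))
      (fun m => PySem.Chars.join []
        ((PySem.List.pyRange ((PySem.Dict.mk location).getD m 0)
            ((PySem.Dict.mk location).getD (m + 1) 0) 1).map
          (fun k => ((PySem.Dict.mk allLine).getD k "").toList)))]
    rw [← hMdef]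
    by_cases hM : M = []
    · simp [hM, pvFail]
    · have hMe : M.isEmpty = false := by simp [hM]
      rw [hMe]
      simp only [Bool.not_false, if_true]
      have hdic : (PySem.List.pyRange 0 (M.length : Int) 1).foldl
          (fun (d : PySem.Dict Int (List Char)) (i : Int) =>
            (PySem.List.pyRange 0 ((PySem.Dict.mk location).getD (st.2.1.getD i 0 + 1) 0 -
                (PySem.Dict.mk location).getD (st.2.1.getD i 0) 0) 1).foldl
              (fun d n => d.insert i (d.getD i [] ++
                ((PySem.Dict.mk allLine).getD ((PySem.Dict.mk location).getD (st.2.1.getD i 0) 0 + n) "").toList))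
              (d.insert i []))
          (PySem.Dict.mk []) =
        (PySem.List.pyRange 0 (M.length : Int) 1).foldl
          (fun d i => d.insert i
            ((PySem.List.pyRange 0 ((PySem.Dict.mk location).getD (st.2.1.getD i 0 + 1) 0 -
                (PySem.Dict.mk location).getD (st.2.1.getD i 0) 0) 1).flatMap
              (fun n => ((PySem.Dict.mk allLine).getD ((PySem.Dict.mk location).getD (st.2.1.getD i 0) 0 + n) "").toList)))
          (PySem.Dict.mk []) := by
        apply PySem.List.foldl_congr_mem
        intro d i _
        rw [pv_innerLoop]
        simp
      rw [hdic]
      rw [pv_loop3 _ 0 (M.length : Int) (by simpa using List.length_pos_iff.mpr hM) []]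
      rw [List.nil_append]
      congr 1
      have hg : ∀ j ∈ PySem.List.pyRange 0 (M.length : Int) 1,
          ((PySem.List.pyRange 0 (M.length : Int) 1).foldl
            (fun d i => d.insert i
              ((PySem.List.pyRange 0 ((PySem.Dict.mk location).getD (st.2.1.getD i 0 + 1) 0 -
                  (PySem.Dict.mk location).getD (st.2.1.getD i 0) 0) 1).flatMap
                (fun n => ((PySem.Dict.mk allLine).getD ((PySem.Dict.mk location).getD (st.2.1.getD i 0) 0 + n) "").toList)))
            (PySem.Dict.mk [])).getD j [] =
          (fun m => PySem.Chars.join []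
            ((PySem.List.pyRange ((PySem.Dict.mk location).getD m 0)
                ((PySem.Dict.mk location).getD (m + 1) 0) 1).map
              (fun k => ((PySem.Dict.mk allLine).getD k "").toList))) (M.getD j.toNat 0) := by
        intro j hj
        obtain ⟨hj0, hjl⟩ := PySem.List.mem_pyRange_one.mp hj
        rw [pv_getD_foldl_insert_nodup _ _ _ (PySem.List.nodup_pyRange_one _ _) j hj,
          hnum j hj0 hjl, pv_block_eq]
      rw [List.map_congr_left hg]
      congr 1
      rw [PySem.List.pyRange_one, List.map_map]
      conv_rhs => rw [← pv_map_getD_range M]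
      rw [List.map_map]
      apply List.map_congr_left
      intro k hk
      simp
  · have h6 : ¬ ((targetCode.length : Int) = 6) := by simpa [PySem.Str.len_eq] using hlen
    simp [h6, pvFail, PySem.Str.len_eq]
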